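-- pv_equiv track=rewrite | github.com/ADALIGO/SimoCasino | complete_translate.py | translate_value
-- ===== SOURCE A (Python) =====
-- def translate_value(value, translation_dict):
--     if not isinstance(value, str):
--         return value
--     if value in translation_dict:
--         return translation_dict[value]
--     sorted_phrases = sorted(translation_dict.keys(), key=len, reverse=True)
--     for english_phrase in sorted_phrases:
--         if english_phrase in value and english_phrase != value:
--             result = value.replace(english_phrase, translation_dict[english_phrase])
--             return result
--     return value
-- ===== SOURCE B (Python) =====
-- def translate_value(value, translation_dict):
--     if not isinstance(value, str):
--         return value
--     if value in translation_dict: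
--         return translation_dict[value]
--     best = None
--     for key in translation_dict:
--         if key in value and (best is None or len(key) > len(best)):
--             best = key
--     if best is None:
--         return value
--     return value.replace(best, translation_dict[best])
-- ===== Notes on version B (the rewrite author's own statement) =====
-- stated objective: simpler
-- what changed: Replaces the sort of all keys followed by a scan with a single pass over the dict that tracks the longest substring key (strict '>' so the earliest key wins ties, matching the stable reverse sort); the exact-key check already guarantees no key equals value, so that guard disappears.
import Mathlib
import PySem

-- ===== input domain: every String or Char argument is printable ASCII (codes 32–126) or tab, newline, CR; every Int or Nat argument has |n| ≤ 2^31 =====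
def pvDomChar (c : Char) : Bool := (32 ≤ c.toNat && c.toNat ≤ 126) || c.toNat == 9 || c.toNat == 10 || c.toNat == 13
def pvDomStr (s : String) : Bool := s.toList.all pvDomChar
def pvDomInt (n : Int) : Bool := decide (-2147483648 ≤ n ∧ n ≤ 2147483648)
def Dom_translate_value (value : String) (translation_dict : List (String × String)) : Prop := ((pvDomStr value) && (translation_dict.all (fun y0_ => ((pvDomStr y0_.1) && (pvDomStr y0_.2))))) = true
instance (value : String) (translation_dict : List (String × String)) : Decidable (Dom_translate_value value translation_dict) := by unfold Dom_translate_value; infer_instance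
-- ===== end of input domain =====

-- B replaces A's sort-all-keys-then-scan with a single pass tracking the longest
-- substring key (strict '>' keeps the earliest key on ties, matching the stable
-- reverse sort); objective: simpler. The 'value' parameter is typed String, so
-- A's non-str passthrough branch is vacuous under the type convention.

-- ===== PORT A =====
-- the 'for english_phrase in sorted_phrases: …' loop of A
def translate_value_loopA (value : String) (d : PySem.Dict String String) : List String → String
  | [] => value
  | k :: rest =>
    if PySem.Str.isIn k value && !(k == value) then
      PySem.Str.replace value k ((d.get? k).getD "")
    else translate_value_loopA value d rest

def translate_value (value : String) (translation_dict : List (String × String)) : String :=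
  let d := PySem.Dict.ofList translation_dict
  match d.get? value with
  | some v => v
  | none =>
    translate_value_loopA value d
      (PySem.List.sorted d.keys (fun k => PySem.Str.len k) true)

-- ===== PORT B =====
-- the 'for key in translation_dict: …' best-tracking loop of B
def translate_value_bestB (value : String) : List String → Option String → Option String
  | [], best => best
  | k :: rest, best =>
    translate_value_bestB value rest
      (if PySem.Str.isIn k value &&
          (match best with
           | none => true
           | some b => decide (PySem.Str.len b < PySem.Str.len k)) then some k else best)

def translate_value_alt (value : String) (translation_dict : List (String × String)) : String :=
  let d := PySem.Dict.ofList translation_dict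
  match d.get? value with
  | some v => v
  | none =>
    match translate_value_bestB value d.keys none with
    | none => value
    | some b => PySem.Str.replace value b ((d.get? b).getD "")

-- ===== PRECONDITION & SPEC =====
def Spec_translate_value (value : String) (translation_dict : List (String × String)) (out : String) : Prop := out = translate_value_alt value translation_dict
instance (value : String) (translation_dict : List (String × String)) (out : String) : Decidable (Spec_translate_value value translation_dict out) := by unfold Spec_translate_value; infer_instance

-- ===== CLAIM (what is proved, stated in full; the proofs are below) =====
def Claim_equal_translate_value : Prop := ∀ (value : String) (translation_dict : List (String × String)), Dom_translate_value value translation_dict → Spec_translate_value value translation_dict (translate_value value translation_dict)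

-- ===== LEMMAS AND PROOFS =====

-- A's loop is find? followed by the replace
theorem loopA_eq_find? (value : String) (d : PySem.Dict String String) (ks : List String) :
    translate_value_loopA value d ks =
      match ks.find? (fun k => PySem.Str.isIn k value && !(k == value)) with
      | some k => PySem.Str.replace value k ((d.get? k).getD "")
      | none => value := by
  induction ks with
  | nil => rfl
  | cons k rest ih =>
    by_cases h : (PySem.Str.isIn k value && !(k == value)) = true
    · rw [List.find?_cons_of_pos (p := fun k => PySem.Str.isIn k value && !(k == value)) h]
      unfold translate_value_loopA
      rw [if_pos h]
    · rw [List.find?_cons_of_neg (p := fun k => PySem.Str.isIn k value && !(k == value)) h]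
      unfold translate_value_loopA
      rw [if_neg h, ih]

-- find? only depends on the predicate's values on members
theorem find?_congr_mem' {α : Type} (p q : α → Bool) (l : List α)
    (h : ∀ x ∈ l, p x = q x) : l.find? p = l.find? q := by
  induction l with
  | nil => rfl
  | cons x t ih =>
    have hx := h x (List.mem_cons_self)
    by_cases hp : p x = true
    · rw [List.find?_cons_of_pos hp, List.find?_cons_of_pos (hx ▸ hp)]
    · have hq : ¬ q x = true := by rw [← hx]; exact hp
      rw [List.find?_cons_of_neg hp, List.find?_cons_of_neg hq,
        ih (fun y hy => h y (List.mem_cons_of_mem _ hy))]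

-- insertBy with the reverse-sort comparator preserves descending sortedness
theorem pairwise_insertBy (key : String → Int) (x : String) (s : List String)
    (hs : s.Pairwise (fun a b => key b ≤ key a)) :
    (PySem.List.insertBy (fun a b => decide (key b < key a)) x s).Pairwise
      (fun a b => key b ≤ key a) := by
  induction s with
  | nil => simp [PySem.List.insertBy]
  | cons y t ih =>
    rcases List.pairwise_cons.mp hs with ⟨hy, ht⟩
    by_cases h : key y < key x
    · rw [show PySem.List.insertBy (fun a b => decide (key b < key a)) x (y :: t)
          = x :: y :: t by simp [PySem.List.insertBy, h]]
      refine List.pairwise_cons.mpr ⟨?_, hs⟩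
      intro z hz
      rcases List.mem_cons.mp hz with rfl | hzt
      · omega
      · have := hy z hzt; omega
    · rw [show PySem.List.insertBy (fun a b => decide (key b < key a)) x (y :: t)
          = y :: PySem.List.insertBy (fun a b => decide (key b < key a)) x t by
            simp [PySem.List.insertBy, h]]
      refine List.pairwise_cons.mpr ⟨?_, ih ht⟩
      intro z hz
      rcases (PySem.List.mem_insertBy _ _ _ _).mp hz with rfl | hzt
      · omega
      · exact hy z hzt

-- the crux: find? after an insertBy step equals B's best-update step
theorem find?_insertBy (key : String → Int) (P : String → Bool) (x : String) (s : List String)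
    (hs : s.Pairwise (fun a b => key b ≤ key a)) :
    (PySem.List.insertBy (fun a b => decide (key b < key a)) x s).find? P =
      (if P x &&
          (match s.find? P with
           | none => true
           | some b => decide (key b < key x)) then some x
       else s.find? P) := by
  induction s with
  | nil =>
    by_cases hp : P x = true
    · rw [show PySem.List.insertBy (fun a b => decide (key b < key a)) x [] = [x] from rfl,
        List.find?_cons_of_pos hp]
      simp [hp]
    · rw [show PySem.List.insertBy (fun a b => decide (key b < key a)) x [] = [x] from rfl,
        List.find?_cons_of_neg hp]
      simp [hp]
  | cons y t ih =>
    rcases List.pairwise_cons.mp hs with ⟨hy, ht⟩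
    by_cases h : key y < key x
    · rw [show PySem.List.insertBy (fun a b => decide (key b < key a)) x (y :: t)
          = x :: y :: t by simp [PySem.List.insertBy, h]]
      by_cases hp : P x = true
      · rw [List.find?_cons_of_pos hp]
        have hb : (match (y :: t).find? P with
            | none => true
            | some b => decide (key b < key x)) = true := by
          cases hfy : (y :: t).find? P with
          | none => rfl
          | some m =>
            have hm : m ∈ y :: t := List.mem_of_find?_eq_some hfy
            have hmy : key m ≤ key y := by
              rcases List.mem_cons.mp hm with rfl | hmt
              · omega
              · exact hy m hmt
            simp only []
            exact decide_eq_true (by omega)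
        rw [hb, hp]
        simp
      · rw [List.find?_cons_of_neg hp]
        simp [hp]
    · rw [show PySem.List.insertBy (fun a b => decide (key b < key a)) x (y :: t)
          = y :: PySem.List.insertBy (fun a b => decide (key b < key a)) x t by
            simp [PySem.List.insertBy, h]]
      by_cases hpy : P y = true
      · rw [List.find?_cons_of_pos hpy, List.find?_cons_of_pos hpy]
        have : ¬ (P x && decide (key y < key x)) = true := by
          intro hcon
          exact h (of_decide_eq_true (Bool.and_elim_right hcon))
        rw [if_neg this]
      · rw [List.find?_cons_of_neg hpy, List.find?_cons_of_neg hpy, ih ht]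

-- B's loop, fed find? of a sorted accumulator, tracks find? of the growing sorted list
theorem bestB_foldl (value : String) (ks : List String) (s : List String)
    (hs : s.Pairwise (fun a b => PySem.Str.len b ≤ PySem.Str.len a)) :
    translate_value_bestB value ks (s.find? (fun k => PySem.Str.isIn k value)) =
      (ks.foldl (fun acc x =>
          PySem.List.insertBy (fun a b => decide (PySem.Str.len b < PySem.Str.len a)) x acc)
        s).find? (fun k => PySem.Str.isIn k value) := by
  induction ks generalizing s with
  | nil => rfl
  | cons k rest ih =>
    simp only [translate_value_bestB, List.foldl_cons]
    rw [← find?_insertBy PySem.Str.len (fun k => PySem.Str.isIn k value) k s hs]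
    exact ih _ (pairwise_insertBy PySem.Str.len k s hs)

-- main: B's pass over ks equals find? over the reverse-length-sorted ks
theorem bestB_eq_find?_sorted (value : String) (ks : List String) :
    (PySem.List.sorted ks (fun k => PySem.Str.len k) true).find?
        (fun k => PySem.Str.isIn k value) =
      translate_value_bestB value ks none := by
  rw [PySem.List.sorted_rev_eq_foldl_insertBy]
  have := bestB_foldl value ks [] List.Pairwise.nil
  simpa [List.find?] using this.symm

-- ===== VERDICT (by name: the statement is the Claim_ definition above) =====
theorem translate_value_spec : Claim_equal_translate_value := by
  intro value translation_dict _
  unfold Spec_translate_value translate_value translate_value_alt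
  cases hg : (PySem.Dict.ofList translation_dict).get? value with
  | some v => simp only [hg]
  | none =>
    simp only [hg]
    have hnv : value ∉ (PySem.Dict.ofList translation_dict).keys :=
      (PySem.Dict.get?_eq_none_iff_not_mem_keys _ value).mp hg
    rw [loopA_eq_find?]
    rw [find?_congr_mem' (fun k => PySem.Str.isIn k value && !(k == value))
        (fun k => PySem.Str.isIn k value) _ (by
          intro k hk
          have hkm : k ∈ (PySem.Dict.ofList translation_dict).keys :=
            (PySem.List.mem_sorted _ _ _ _).mp hk
          have hne : k ≠ value := fun h => hnv (h ▸ hkm)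
          simp [hne])]
    rw [bestB_eq_find?_sorted]
    cases translate_value_bestB value (PySem.Dict.ofList translation_dict).keys none <;> rfl
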